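-- pv_equiv track=rewrite | github.com/mi6oo6im/my_python_training | fundamentals/exercise_text_processing/9_rage_quit.py | counter_unique_func
-- ===== SOURCE A (Python) =====
-- def counter_unique_func(string: str):
--     unique_list = []
--     counter = 0
--     for char in string:
--         if char not in unique_list and not char.isdigit():
--             counter += 1
--             unique_list.append(char)
--     return counter
-- ===== SOURCE B (Python) =====
-- def counter_unique_func(string: str):
--     counter = 0
--     prev = None
--     for char in sorted(string):
--         if not char.isdigit() and char != prev:
--             counter += 1
--         prev = char
--     return counter
-- ===== Notes on version B (the rewrite author's own statement) =====
-- stated objective: alternative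
-- what changed: Replaces the membership-list scan (list grows, 'char not in unique_list' rescans it) with a sort-then-scan: sort the characters once and count each non-digit character only when it differs from its predecessor, so runs of equal characters collapse without any membership structure.
import Mathlib
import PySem

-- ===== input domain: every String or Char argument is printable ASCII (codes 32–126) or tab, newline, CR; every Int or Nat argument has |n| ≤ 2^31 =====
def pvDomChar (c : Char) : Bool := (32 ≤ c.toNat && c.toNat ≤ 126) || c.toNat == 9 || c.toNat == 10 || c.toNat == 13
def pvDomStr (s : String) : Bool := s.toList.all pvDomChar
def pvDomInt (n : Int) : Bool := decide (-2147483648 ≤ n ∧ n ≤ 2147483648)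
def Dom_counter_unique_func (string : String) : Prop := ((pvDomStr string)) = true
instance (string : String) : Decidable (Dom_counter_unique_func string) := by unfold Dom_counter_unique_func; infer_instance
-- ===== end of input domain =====

-- B replaces A's growing membership list (rescanned for every character) by a single
-- sort-then-scan pass that counts a non-digit character when it differs from its
-- predecessor in the sorted order (objective: alternative algorithm, similar cost).

-- ===== PORT A =====
-- state = (unique_list, counter); one step of A's loop body
def pvAstep (st : List Char × Int) (char : Char) : List Char × Int :=
  if char ∉ st.1 ∧ ¬ PySem.Chars.isdigit char then (st.1 ++ [char], st.2 + 1) else st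

def counter_unique_func (string : String) : Int :=
  (string.toList.foldl pvAstep ([], 0)).2

-- ===== PORT B =====
-- state = (prev, counter); one step of B's loop body over sorted(string)
def pvBstep (st : Option Char × Int) (char : Char) : Option Char × Int :=
  (some char, if ¬ PySem.Chars.isdigit char ∧ st.1 ≠ some char then st.2 + 1 else st.2)

def counter_unique_func_alt (string : String) : Int :=
  ((PySem.List.sorted string.toList (fun c => c.toNat) false).foldl pvBstep (none, 0)).2

-- ===== PRECONDITION & SPEC =====
def Spec_counter_unique_func (string : String) (out : Int) : Prop := out = counter_unique_func_alt string
instance (string : String) (out : Int) : Decidable (Spec_counter_unique_func string out) := by unfold Spec_counter_unique_func; infer_instance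

-- ===== CLAIM (what is proved, stated in full; the proofs are below) =====
def Claim_equal_counter_unique_func : Prop := ∀ (string : String), Dom_counter_unique_func string → Spec_counter_unique_func string (counter_unique_func string)

-- ===== LEMMAS AND PROOFS =====

-- the set of distinct non-digit characters of l
def pvNd (l : List Char) : Finset Char := (l.filter (fun c => !PySem.Chars.isdigit c)).toFinset

lemma mem_pvNd {x : Char} {l : List Char} : x ∈ pvNd l ↔ x ∈ l ∧ ¬ PySem.Chars.isdigit x := by
  simp [pvNd]

lemma pv_char_eq {a b : Char} (h : a.toNat = b.toNat) : a = b := by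
  apply Char.ext; exact UInt32.toNat_inj.mp h

lemma pv_card_insert (a : Char) (s : Finset Char) :
    (insert a s).card = (s.erase a).card + 1 := by
  have h : insert a s = insert a (s.erase a) := by
    ext x; by_cases hx : x = a <;> simp [hx]
  rw [h]
  exact Finset.card_insert_of_notMem (Finset.notMem_erase _ _)

lemma pvNd_cons_digit {ch : Char} (t : List Char) (hd : PySem.Chars.isdigit ch) :
    pvNd (ch :: t) = pvNd t := by
  simp [pvNd, hd]

lemma pvNd_cons_nondigit {ch : Char} (t : List Char) (hd : ¬ PySem.Chars.isdigit ch) :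
    pvNd (ch :: t) = insert ch (pvNd t) := by
  ext x; by_cases hx : x = ch <;> simp [pvNd, hd, hx]

-- A's loop invariant: the counter advances by the number of new distinct non-digit chars
lemma pv_foldA (l : List Char) : ∀ (ul : List Char) (c : Int),
    (l.foldl pvAstep (ul, c)).2 = c + ((pvNd l) \ ul.toFinset).card := by
  induction l with
  | nil => intro ul c; simp [pvNd]
  | cons ch t ih =>
    intro ul c
    simp only [List.foldl_cons, pvAstep]
    split_ifs with h
    · rw [ih]
      have e1 : pvNd (ch :: t) \ ul.toFinset = insert ch (pvNd t \ ul.toFinset) := by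
        rw [pvNd_cons_nondigit t h.2]
        ext x; by_cases hx : x = ch <;> simp [hx, h.1]
      have e2 : pvNd t \ (ul ++ [ch]).toFinset = (pvNd t \ ul.toFinset).erase ch := by
        ext x; simp; tauto
      rw [e2, e1, pv_card_insert]
      push_cast; ring
    · rw [ih]
      have e : pvNd (ch :: t) \ ul.toFinset = pvNd t \ ul.toFinset := by
        by_cases hd : PySem.Chars.isdigit ch
        · rw [pvNd_cons_digit t hd]
        · have hmem : ch ∈ ul := by tauto
          rw [pvNd_cons_nondigit t hd]
          ext x; by_cases hx : x = ch <;> simp [hx, hmem]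
      rw [e]

-- exclude the previous character (if any) from a set
def pvExcl : Option Char → Finset Char → Finset Char
  | none => fun s => s
  | some v => fun s => s.erase v

lemma pvExcl_none (s : Finset Char) : pvExcl none s = s := rfl
lemma pvExcl_some (v : Char) (s : Finset Char) : pvExcl (some v) s = s.erase v := rfl

-- B's loop invariant on a sorted suffix: what is added is the number of distinct
-- non-digit characters of the suffix, minus the previous character
lemma pv_foldB : ∀ (l : List Char), List.Pairwise (fun a b => a.toNat ≤ b.toNat) l →
    ∀ (p : Option Char) (c : Int),
    (∀ v, p = some v → ∀ x ∈ l, v.toNat ≤ x.toNat) →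
    (l.foldl pvBstep (p, c)).2 = c + (pvExcl p (pvNd l)).card := by
  intro l
  induction l with
  | nil => intro _ p c _; cases p <;> simp [pvNd, pvExcl]
  | cons ch t ih =>
    intro hpw p c hp
    have hch : ∀ x ∈ t, ch.toNat ≤ x.toNat := (List.pairwise_cons.mp hpw).1
    have hpw' := (List.pairwise_cons.mp hpw).2
    simp only [List.foldl_cons, pvBstep]
    rw [ih hpw' (some ch) _ (by intro v hv x hx; obtain rfl : v = ch := (Option.some.inj hv).symm; exact hch x hx)]
    rw [pvExcl_some]
    -- a previous char v ≠ ch, or a digit v, cannot reappear in pvNd t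
    have hnotin : ∀ v, p = some v → v ∈ pvNd t → v = ch := by
      rintro v rfl hv
      rcases mem_pvNd.mp hv with ⟨hvt, _⟩
      exact pv_char_eq (le_antisymm (hp v rfl ch List.mem_cons_self) (hch v hvt))
    by_cases hd : PySem.Chars.isdigit ch
    · rw [pvNd_cons_digit t hd]
      have e1 : (pvNd t).erase ch = pvNd t := by
        apply Finset.erase_eq_of_notMem
        intro hc; exact (mem_pvNd.mp hc).2 hd
      have e2 : pvExcl p (pvNd t) = pvNd t := by
        cases p with
        | none => exact pvExcl_none _
        | some v =>
          rw [pvExcl_some]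
          apply Finset.erase_eq_of_notMem
          intro hv
          have hvch := hnotin v rfl hv
          subst hvch
          exact (mem_pvNd.mp hv).2 hd
      rw [if_neg (by simp [hd]), e1, e2]
    · rw [pvNd_cons_nondigit t hd]
      by_cases hpc : p = some ch
      · subst hpc
        rw [if_neg (by simp), pvExcl_some]
        have e : (insert ch (pvNd t)).erase ch = (pvNd t).erase ch := by
          ext x; by_cases hx : x = ch <;> simp [hx]
        rw [e]
      · have hcond : (¬ PySem.Chars.isdigit ch ∧ p ≠ some ch) := ⟨hd, hpc⟩
        have e : pvExcl p (insert ch (pvNd t)) = insert ch (pvNd t) := by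
          cases p with
          | none => exact pvExcl_none _
          | some v =>
            rw [pvExcl_some]
            apply Finset.erase_eq_of_notMem
            intro hv
            rcases Finset.mem_insert.mp hv with hv | hv
            · exact hpc (by rw [hv])
            · exact hpc (by rw [hnotin v rfl hv])
        rw [if_pos hcond, e, pv_card_insert]
        push_cast; ring

lemma pv_A_eq (s : String) : counter_unique_func s = (pvNd s.toList).card := by
  unfold counter_unique_func
  rw [pv_foldA]
  simp

lemma pv_B_eq (s : String) : counter_unique_func_alt s = (pvNd s.toList).card := by
  unfold counter_unique_func_alt
  rw [pv_foldB _ (PySem.List.sorted_pairwise s.toList (fun c => c.toNat)) none _ (by simp)]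
  rw [pvExcl_none]
  have hset : pvNd (PySem.List.sorted s.toList (fun c => c.toNat) false) = pvNd s.toList := by
    ext x
    simp [mem_pvNd, PySem.List.mem_sorted]
  rw [hset]
  simp

-- ===== VERDICT (by name: the statement is the Claim_ definition above) =====
theorem counter_unique_func_spec : Claim_equal_counter_unique_func := by
  intro s _
  unfold Spec_counter_unique_func
  rw [pv_A_eq, pv_B_eq]
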